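-- pv_equiv track=rewrite | github.com/haviesh12/ai_chatbot | app.py | choose_next_symptom
-- ===== SOURCE A (Python) =====
-- def choose_next_symptom(top_diseases, known_symptoms):
--     # ... (This function remains the same)
--     symptom_counts = {}
--     for d in top_diseases[:4]:
--         for s in d["symptoms"]:
--             if s not in known_symptoms:
--                 symptom_counts[s] = symptom_counts.get(s, 0) + 1
--     if not symptom_counts: return None
--     for symptom, count in sorted(symptom_counts.items(), key=lambda item: item[1], reverse=True):
--         if count < len(top_diseases[:4]): return symptom
--     return max(symptom_counts, key=symptom_counts.get)
-- ===== SOURCE B (Python) =====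
-- def choose_next_symptom(top_diseases, known_symptoms):
--     # Same counting pass as the spec requires, then ONE linear scan over the
--     # counts (no sort): track the best discriminating symptom (max count < n,
--     # first wins ties) and the best overall symptom (max count, first wins ties).
--     top = top_diseases[:4]
--     n = len(top)
--     symptom_counts = {}
--     for d in top:
--         for s in d["symptoms"]:
--             if s not in known_symptoms:
--                 symptom_counts[s] = symptom_counts.get(s, 0) + 1
--     best_all = None   # (symptom, count) with max count overall
--     best_disc = None  # (symptom, count) with max count among counts < n
--     for s, c in symptom_counts.items():
--         if best_all is None or best_all[1] < c:
--             best_all = (s, c)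
--         if c < n and (best_disc is None or best_disc[1] < c):
--             best_disc = (s, c)
--     if best_all is None:
--         return None
--     return best_disc[0] if best_disc is not None else best_all[0]
-- ===== Notes on version B (the rewrite author's own statement) =====
-- stated objective: alternative
-- what changed: Replaces the sort-then-scan selection (stable sort of the counts by count descending, first count < n, else max with key=get) by a single linear pass over the counts that tracks the best discriminating symptom (max count < n) and the best overall symptom, each with strict '>' so the first-inserted symptom wins ties.
import Mathlib
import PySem

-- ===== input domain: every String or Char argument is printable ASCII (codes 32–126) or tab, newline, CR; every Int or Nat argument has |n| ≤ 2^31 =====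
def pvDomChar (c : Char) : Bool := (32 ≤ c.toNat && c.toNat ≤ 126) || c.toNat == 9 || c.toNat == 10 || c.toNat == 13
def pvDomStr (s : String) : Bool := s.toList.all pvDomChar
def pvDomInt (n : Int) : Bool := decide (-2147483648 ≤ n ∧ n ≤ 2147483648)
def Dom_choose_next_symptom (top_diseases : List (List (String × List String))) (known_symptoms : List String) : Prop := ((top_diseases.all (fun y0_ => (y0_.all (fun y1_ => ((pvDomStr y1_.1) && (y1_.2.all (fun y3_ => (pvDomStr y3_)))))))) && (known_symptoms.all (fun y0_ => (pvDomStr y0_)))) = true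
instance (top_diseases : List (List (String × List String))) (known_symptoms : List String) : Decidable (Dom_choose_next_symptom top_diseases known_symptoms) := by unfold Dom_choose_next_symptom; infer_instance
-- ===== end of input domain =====

-- B replaces A's sort-then-scan selection by one linear max-tracking pass over the counts (alternative algorithm, same result).

-- ===== PORT A =====
-- the counting loop of A: for d in top_diseases[:4]: for s in d["symptoms"]: if s not in known_symptoms: counts[s] += 1
-- (d["symptoms"] is ported with getD; Pre_ excludes the KeyError inputs, so this is exact on Pre_)
def pvCounts (top4 : List (List (String × List String))) (known_symptoms : List String) : PySem.Dict String Int :=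
  top4.foldl
    (fun d dis =>
      ((PySem.Dict.mk dis).getD "symptoms" ([] : List String)).foldl
        (fun d s => if s ∈ known_symptoms then d else d.insert s (d.getD s 0 + 1)) d)
    PySem.Dict.empty

def choose_next_symptom (top_diseases : List (List (String × List String))) (known_symptoms : List String) : Option String :=
  let top4 := PySem.List.slice top_diseases none (some 4)
  let symptom_counts := pvCounts top4 known_symptoms
  if symptom_counts.items.isEmpty then none
  else
    -- for symptom, count in sorted(items, key=count, reverse=True): if count < len(top_diseases[:4]): return symptom
    match (PySem.List.sorted symptom_counts.items (fun p => p.2) true).find?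
            (fun p => decide (p.2 < ((PySem.List.slice top_diseases none (some 4)).length : Int))) with
    | some p => some p.1
    | none => PySem.List.max? symptom_counts.keys (fun k => symptom_counts.getD k 0)

-- ===== PORT B =====
-- (Source B's counting pass is the same loop as A's by design: the shared helper pvCounts above is both ports' counting loop)
def choose_next_symptom_alt (top_diseases : List (List (String × List String))) (known_symptoms : List String) : Option String :=
  let top := PySem.List.slice top_diseases none (some 4)
  let n : Int := top.length
  let symptom_counts := pvCounts top known_symptoms
  -- one pass: best_all = first max-count item, best_disc = first max-count item among counts < n
  let st := symptom_counts.items.foldl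
    (fun (st : Option (String × Int) × Option (String × Int)) p =>
      let ba := match st.1 with | none => some p | some q => if q.2 < p.2 then some p else some q
      let bd := if p.2 < n then
                  (match st.2 with | none => some p | some q => if q.2 < p.2 then some p else some q)
                else st.2
      (ba, bd))
    (none, none)
  match st.1 with
  | none => none
  | some q => match st.2 with | some r => some r.1 | none => some q.1

-- ===== PRECONDITION & SPEC =====
-- Pre_ excludes exactly the inputs where A raises KeyError: a disease dict among the first four without a "symptoms" key.
def Pre_choose_next_symptom (top_diseases : List (List (String × List String))) (known_symptoms : List String) : Prop :=
  ∀ dis ∈ PySem.List.slice top_diseases none (some 4), (PySem.Dict.mk dis).contains "symptoms" = true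
instance (top_diseases : List (List (String × List String))) (known_symptoms : List String) : Decidable (Pre_choose_next_symptom top_diseases known_symptoms) := by unfold Pre_choose_next_symptom; infer_instance

def pvWitness_choose_next_symptom : (List (List (String × List String))) × List String :=
  ([[("symptoms", ["cough", "fever"])], [("symptoms", ["cough"])]], ["fever"])

def Spec_choose_next_symptom (top_diseases : List (List (String × List String))) (known_symptoms : List String) (out : Option String) : Prop := out = choose_next_symptom_alt top_diseases known_symptoms
instance (top_diseases : List (List (String × List String))) (known_symptoms : List String) (out : Option String) : Decidable (Spec_choose_next_symptom top_diseases known_symptoms out) := by unfold Spec_choose_next_symptom; infer_instance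

-- ===== CLAIM (what is proved, stated in full; the proofs are below) =====
def Claim_equal_choose_next_symptom : Prop := ∀ (top_diseases : List (List (String × List String))) (known_symptoms : List String), Dom_choose_next_symptom top_diseases known_symptoms → Pre_choose_next_symptom top_diseases known_symptoms → Spec_choose_next_symptom top_diseases known_symptoms (choose_next_symptom top_diseases known_symptoms)

-- ===== LEMMAS AND PROOFS =====

-- the max?-fold step (first extremal element wins)
def pvMStep {α : Type} (key : α → Int) (acc : Option α) (x : α) : Option α :=
  match acc with
  | none => some x
  | some m => if key m < key x then some x else some m

theorem pvMax?_eq_foldl {α : Type} (key : α → Int) (l : List α) :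
    PySem.List.max? l key = l.foldl (pvMStep key) none := rfl

-- inserting x into a descending list commutes with find? as one max?-step
theorem pvFind?_insertBy {α : Type} (key : α → Int) (pred : α → Bool) (x : α) :
    ∀ (s : List α), s.Pairwise (fun a b => key b ≤ key a) →
      ((PySem.List.insertBy (fun a b => decide (key b < key a)) x s).find? pred)
        = if pred x then
            (match s.find? pred with
             | none => some x
             | some m => if key m < key x then some x else some m)
          else s.find? pred := by
  intro s
  induction s with
  | nil =>
      intro _
      by_cases hp : pred x <;> simp [PySem.List.insertBy, List.find?, hp]
  | cons y ys ih =>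
      intro hpw
      have h1 : ∀ b ∈ ys, key b ≤ key y := (List.pairwise_cons.mp hpw).1
      have h2 : ys.Pairwise (fun a b => key b ≤ key a) := (List.pairwise_cons.mp hpw).2
      by_cases hb : key y < key x
      · -- x goes in front
        have : PySem.List.insertBy (fun a b => decide (key b < key a)) x (y :: ys)
            = x :: y :: ys := by simp [PySem.List.insertBy, hb]
        rw [this]
        by_cases hp : pred x
        · -- any m found in y :: ys has key m ≤ key y < key x
          rw [List.find?_cons_of_pos hp, if_pos hp]
          cases hm : (y :: ys).find? pred with
          | none => simp
          | some m =>
              have hmem : m ∈ y :: ys := List.mem_of_find?_eq_some hm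
              have hle : key m ≤ key y := by
                rcases List.mem_cons.mp hmem with h | h
                · exact le_of_eq (by rw [h])
                · exact h1 m h
              have : key m < key x := lt_of_le_of_lt hle hb
              simp [this]
        · rw [List.find?_cons_of_neg hp, if_neg hp]
      · -- x goes after y
        have : PySem.List.insertBy (fun a b => decide (key b < key a)) x (y :: ys)
            = y :: PySem.List.insertBy (fun a b => decide (key b < key a)) x ys := by
          simp [PySem.List.insertBy, hb]
        rw [this]
        by_cases hy : pred y
        · -- find? stops at y on both sides
          rw [List.find?_cons_of_pos hy, List.find?_cons_of_pos hy]
          by_cases hp : pred x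
          · simp [hp, not_lt.mp hb]
          · simp [hp]
        · rw [List.find?_cons_of_neg hy, List.find?_cons_of_neg hy, ih h2]

-- find? over sorted-descending equals max? over the filtered original list (stability, proved from the right)
theorem pvFind?_sorted_rev {α : Type} (key : α → Int) (pred : α → Bool) (l : List α) :
    (PySem.List.sorted l key true).find? pred = PySem.List.max? (l.filter pred) key := by
  induction l using List.reverseRecOn with
  | nil => simp [PySem.List.sorted, PySem.List.max?]
  | append_singleton l x ih =>
      have hs : PySem.List.sorted (l ++ [x]) key true
          = PySem.List.insertBy (fun a b => decide (key b < key a)) x (PySem.List.sorted l key true) := by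
        rw [PySem.List.sorted_rev_eq_foldl_insertBy, PySem.List.sorted_rev_eq_foldl_insertBy,
            List.foldl_append]
        rfl
      have hpw := PySem.List.sorted_pairwise_rev (xs := l) (key := key)
      rw [hs, pvFind?_insertBy key pred x _ hpw, ih]
      rw [pvMax?_eq_foldl, pvMax?_eq_foldl, List.filter_append, List.foldl_append]
      by_cases hp : pred x
      · simp only [hp, List.filter_cons, List.filter_nil, if_pos, List.foldl_cons, List.foldl_nil]
        cases h : (l.filter pred).foldl (pvMStep key) none with
        | none => simp [pvMStep, h]
        | some m => simp [pvMStep, h]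
      · simp [hp, List.filter_cons]

-- max? commutes with map
theorem pvMax?_map {α β : Type} (key : β → Int) (g : α → β) (l : List α) :
    PySem.List.max? (l.map g) key = (PySem.List.max? l (fun x => key (g x))).map g := by
  rw [pvMax?_eq_foldl, pvMax?_eq_foldl]
  have : ∀ (l : List α) (o : Option α),
      (l.map g).foldl (pvMStep key) (o.map g) = (l.foldl (pvMStep (fun x => key (g x))) o).map g := by
    intro l
    induction l with
    | nil => intro o; simp
    | cons a t ih =>
        intro o
        cases o with
        | none =>
            simp only [List.map_cons, List.foldl_cons, Option.map_none]
            have : pvMStep key none (g a) = (some a).map g := by simp [pvMStep]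
            rw [this, ih (some a)]
            rfl
        | some m =>
            simp only [List.map_cons, List.foldl_cons, Option.map_some]
            by_cases h : key (g m) < key (g a)
            · have e1 : pvMStep key (some (g m)) (g a) = (some a).map g := by simp [pvMStep, h]
              have e2 : pvMStep (fun x => key (g x)) (some m) a = some a := by simp [pvMStep, h]
              rw [e1, e2, ih (some a)]
            · have e1 : pvMStep key (some (g m)) (g a) = (some m).map g := by simp [pvMStep, h]
              have e2 : pvMStep (fun x => key (g x)) (some m) a = some m := by simp [pvMStep, h]
              rw [e1, e2, ih (some m)]
  exact this l none

-- the counting fold keeps dict keys nodup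
theorem pvNodup_inner (ks : List String) :
    ∀ (l : List String) (d : PySem.Dict String Int), d.keys.Nodup →
      ((l.foldl (fun d s => if s ∈ ks then d else d.insert s (d.getD s 0 + 1)) d)).keys.Nodup := by
  intro l
  induction l with
  | nil => intro d h; exact h
  | cons s t ih =>
      intro d h
      simp only [List.foldl_cons]
      by_cases hs : s ∈ ks
      · simp only [if_pos hs]; exact ih d h
      · simp only [if_neg hs]; exact ih _ (PySem.Dict.nodup_keys_insert _ _ _ h)

theorem pvNodup_counts (top : List (List (String × List String))) (ks : List String) :
    (pvCounts top ks).keys.Nodup := by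
  unfold pvCounts
  have : ∀ (l : List (List (String × List String))) (d : PySem.Dict String Int), d.keys.Nodup →
      (l.foldl (fun d dis => ((PySem.Dict.mk dis).getD "symptoms" ([] : List String)).foldl
        (fun d s => if s ∈ ks then d else d.insert s (d.getD s 0 + 1)) d) d).keys.Nodup := by
    intro l
    induction l with
    | nil => intro d h; exact h
    | cons a t ih =>
        intro d h
        simp only [List.foldl_cons]
        exact ih _ (pvNodup_inner ks _ d h)
  exact this top PySem.Dict.empty (PySem.Dict.nodup_keys_empty)

-- B's single pass is the pair (max? items, max? (items.filter (count < n)))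
theorem pvFoldPair (n : Int) :
    ∀ (l : List (String × Int)) (a b : Option (String × Int)),
      l.foldl
        (fun (st : Option (String × Int) × Option (String × Int)) p =>
          let ba := match st.1 with | none => some p | some q => if q.2 < p.2 then some p else some q
          let bd := if p.2 < n then
                      (match st.2 with | none => some p | some q => if q.2 < p.2 then some p else some q)
                    else st.2
          (ba, bd))
        (a, b)
      = (l.foldl (pvMStep (fun p => p.2)) a,
         (l.filter (fun p => decide (p.2 < n))).foldl (pvMStep (fun p => p.2)) b) := by
  intro l
  induction l with
  | nil => intro a b; rfl
  | cons p t ih =>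
      intro a b
      simp only [List.foldl_cons, List.filter_cons]
      by_cases hp : p.2 < n
      · simp only [if_pos hp, decide_eq_true_eq, List.foldl_cons]
        rw [ih]
        cases a <;> cases b <;> simp [pvMStep]
      · simp only [if_neg hp, decide_eq_true_eq]
        rw [ih]
        cases a <;> simp [pvMStep, hp]

-- ===== VERDICT (by name: the statement is the Claim_ definition above) =====
theorem choose_next_symptom_spec : Claim_equal_choose_next_symptom := by
  intro tds ks _ _
  unfold Spec_choose_next_symptom choose_next_symptom choose_next_symptom_alt
  dsimp only
  set top4 := PySem.List.slice tds none (some 4) with htop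
  set cnts := pvCounts top4 ks with hc
  set n : Int := (top4.length : Int) with hn
  rw [pvFoldPair n cnts.items none none]
  rw [pvFind?_sorted_rev (fun p : String × Int => p.2) (fun p => decide (p.2 < n)) cnts.items]
  rw [pvMax?_eq_foldl]
  by_cases he : cnts.items = []
  · simp [he]
  · have hne : cnts.items.isEmpty = false := by simp [he]
    simp only [hne, Bool.false_eq_true, if_neg, if_false]
    -- fallback: max? over keys with getD equals max? over items with .2, projected to the key
    have hkeys : PySem.List.max? cnts.keys (fun k => cnts.getD k 0)
        = (cnts.items.foldl (pvMStep (fun p : String × Int => p.2)) none).map (fun p => p.1) := by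
      have hnd : cnts.keys.Nodup := pvNodup_counts top4 ks
      have hitems : cnts.items = cnts.keys.map (fun k => (k, cnts.getD k 0)) :=
        PySem.Dict.items_eq_map_keys cnts hnd 0
      rw [← pvMax?_eq_foldl, hitems, pvMax?_map]
      cases PySem.List.max? cnts.keys (fun k => (k, cnts.getD k 0).2) <;> rfl
    -- the overall max over a nonempty list is some
    have hall : ∃ q, cnts.items.foldl (pvMStep (fun p : String × Int => p.2)) none = some q := by
      cases hm : PySem.List.max? cnts.items (fun p : String × Int => p.2) with
      | none => exact absurd ((PySem.List.max?_eq_none_iff _ _).mp hm) he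
      | some q => exact ⟨q, by rw [← pvMax?_eq_foldl, hm]⟩
    obtain ⟨q, hq⟩ := hall
    rw [hq] at hkeys ⊢
    cases hf : (cnts.items.filter (fun p => decide (p.2 < n))).foldl (pvMStep (fun p : String × Int => p.2)) none with
    | none => simpa [hf] using hkeys
    | some r => simp [hf]
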